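-- pv_equiv track=rewrite | github.com/a-peyrard/aoc-2020 | aoc/day17/conway_cubes.py | _init_empty_pocket
-- ===== SOURCE A (Python) =====
-- from typing import List, Tuple
--
-- PocketDimension = List[List[List[bool]]]
--
-- def _init_empty_pocket(pocket: PocketDimension) -> PocketDimension:
--     return [
--         [
--             [False] * len(pocket[z][y])
--             for y in range(len(pocket[z]))
--         ]
--         for z in range(len(pocket))
--     ]
-- ===== SOURCE B (Python) =====
-- def _init_empty_pocket(pocket):
--     def blank(x):
--         if isinstance(x, list):
--             return [blank(e) for e in x]
--         return False
--     return blank(pocket)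
-- ===== Notes on version B (the rewrite author's own statement) =====
-- stated objective: simpler
-- what changed: Replaces the three fixed index-based comprehensions (range/len lookups at each level) with one small recursion over the nested-list structure that maps every bool leaf to False.
import Mathlib
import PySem

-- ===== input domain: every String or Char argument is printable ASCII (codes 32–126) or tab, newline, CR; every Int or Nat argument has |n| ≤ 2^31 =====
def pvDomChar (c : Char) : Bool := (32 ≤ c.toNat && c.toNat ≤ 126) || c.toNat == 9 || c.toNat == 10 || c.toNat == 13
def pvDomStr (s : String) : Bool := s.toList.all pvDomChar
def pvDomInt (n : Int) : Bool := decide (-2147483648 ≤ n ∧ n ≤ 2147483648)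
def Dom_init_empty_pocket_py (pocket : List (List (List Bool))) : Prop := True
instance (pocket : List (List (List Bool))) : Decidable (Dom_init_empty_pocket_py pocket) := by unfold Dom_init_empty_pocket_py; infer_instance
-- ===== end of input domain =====

-- B replaces A's three fixed index-based comprehensions with a single structural recursion (map at each level, False at leaves); objective: simpler.


-- ===== PORT A =====
def init_empty_pocket_py (pocket : List (List (List Bool))) : List (List (List Bool)) :=
  (PySem.List.pyRange 0 pocket.length 1).map (fun z =>
    let plane := PySem.List.pyGetD pocket z []
    (PySem.List.pyRange 0 plane.length 1).map (fun y =>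
      List.replicate (PySem.List.pyGetD plane y []).length false))

-- ===== PORT B =====
-- B: one recursion over the nested structure (one helper per nesting level, each
-- mapping the blanking of the level below; a bool leaf becomes False)
def blankRow (r : List Bool) : List Bool := r.map (fun _ => false)

def blankPlane (p : List (List Bool)) : List (List Bool) := p.map blankRow

def init_empty_pocket_py_alt (pocket : List (List (List Bool))) : List (List (List Bool)) :=
  pocket.map blankPlane

-- ===== PRECONDITION & SPEC =====
def Spec_init_empty_pocket_py (pocket : List (List (List Bool))) (out : List (List (List Bool))) : Prop := out = init_empty_pocket_py_alt pocket
instance (pocket : List (List (List Bool))) (out : List (List (List Bool))) : Decidable (Spec_init_empty_pocket_py pocket out) := by unfold Spec_init_empty_pocket_py; infer_instance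

-- ===== CLAIM (what is proved, stated in full; the proofs are below) =====
def Claim_equal_init_empty_pocket_py : Prop := ∀ (pocket : List (List (List Bool))), Dom_init_empty_pocket_py pocket → Spec_init_empty_pocket_py pocket (init_empty_pocket_py pocket)

-- ===== LEMMAS AND PROOFS =====

-- ===== VERDICT (by name: the statement is the Claim_ definition above) =====
lemma map_comp_pyGetD {A B : Type} (xs : List A) (d : A) (g : A → B) :
    (PySem.List.pyRange 0 xs.length 1).map (fun i => g (PySem.List.pyGetD xs i d)) = xs.map g := by
  calc (PySem.List.pyRange 0 xs.length 1).map (fun i => g (PySem.List.pyGetD xs i d))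
      = ((PySem.List.pyRange 0 xs.length 1).map (fun i => PySem.List.pyGetD xs i d)).map g := by
        rw [List.map_map]; rfl
    _ = xs.map g := by rw [PySem.List.map_pyGetD_pyRange_zero']

theorem init_empty_pocket_py_spec : Claim_equal_init_empty_pocket_py := by
  intro pocket _
  unfold Spec_init_empty_pocket_py init_empty_pocket_py init_empty_pocket_py_alt
  have h1 : ∀ (plane : List (List Bool)),
      (PySem.List.pyRange 0 plane.length 1).map (fun y =>
        List.replicate (PySem.List.pyGetD plane y []).length false) = blankPlane plane := by
    intro plane
    rw [map_comp_pyGetD plane [] (fun r => List.replicate r.length false)]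
    simp [blankPlane, blankRow, List.map_const']
  calc (PySem.List.pyRange 0 pocket.length 1).map (fun z =>
          let plane := PySem.List.pyGetD pocket z []
          (PySem.List.pyRange 0 plane.length 1).map (fun y =>
            List.replicate (PySem.List.pyGetD plane y []).length false))
      = (PySem.List.pyRange 0 pocket.length 1).map (fun z =>
          blankPlane (PySem.List.pyGetD pocket z [])) := by
        exact List.map_congr_left (fun z _ => h1 _)
    _ = pocket.map blankPlane := map_comp_pyGetD pocket [] blankPlane
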